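-- pv_equiv track=rewrite | github.com/Pungsis/python-exercises | clave_bancaria.py | verificar_numeros
-- ===== SOURCE A (Python) =====
-- def verificar_numeros(clave):
--     numeros = [0, 1, 2, 3, 4, 5, 6, 7, 8, 9]
--     conteo = [0, 0, 0, 0, 0, 0, 0, 0, 0, 0]
--     clave_solo_numeros = ""
--     for i in clave:
--         if i in "0123456789":
--             clave_solo_numeros += i
--
--     if len(clave_solo_numeros) != 4:
--         return False
--
--     for i in clave_solo_numeros:
--         if int(i) in numeros:
--             conteo[int(i)] += 1
--
--     verificacion_final = True
--
--     for i in conteo: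
--         if i > 1:
--             verificacion_final = False
--     return verificacion_final
-- ===== SOURCE B (Python) =====
-- def verificar_numeros(clave):
--     seen = ""
--     for c in clave:
--         if c in "0123456789":
--             if c in seen or len(seen) == 4:
--                 return False
--             seen += c
--     return len(seen) == 4
-- ===== Notes on version B (the rewrite author's own statement) =====
-- stated objective: alternative
-- what changed: Replaces A's three staged passes (filter into a string, fill a size-10 frequency array via int(i), scan the array for counts > 1) with a single pass over clave that maintains a seen-digit prefix and returns False immediately on a repeated digit or a fifth digit.
import Mathlib
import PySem

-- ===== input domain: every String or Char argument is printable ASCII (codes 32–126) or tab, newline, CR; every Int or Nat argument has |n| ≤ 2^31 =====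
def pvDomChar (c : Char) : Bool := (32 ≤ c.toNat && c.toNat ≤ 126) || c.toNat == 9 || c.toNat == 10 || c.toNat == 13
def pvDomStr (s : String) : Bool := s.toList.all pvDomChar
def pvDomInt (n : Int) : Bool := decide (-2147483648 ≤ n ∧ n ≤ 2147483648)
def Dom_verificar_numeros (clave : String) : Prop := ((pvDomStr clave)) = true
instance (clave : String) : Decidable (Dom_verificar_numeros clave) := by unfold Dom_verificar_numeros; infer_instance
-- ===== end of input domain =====

-- B replaces A's three staged passes (filter, size-10 frequency array, final scan) with one
-- early-exit pass keeping the digits seen so far (objective: alternative).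

-- ===== PORT A =====
def verificar_numeros (clave : String) : Bool :=
  let numeros : List Int := [0, 1, 2, 3, 4, 5, 6, 7, 8, 9]
  let conteo : List Int := [0, 0, 0, 0, 0, 0, 0, 0, 0, 0]
  let clave_solo_numeros : List Char :=
    clave.toList.foldl
      (fun acc i => if ("0123456789".toList.contains i) then acc ++ [i] else acc) []
  if clave_solo_numeros.length ≠ 4 then false
  else
    let conteo :=
      clave_solo_numeros.foldl
        (fun conteo i =>
          -- int(i): i is always one of '0'..'9' here, so ofChars? is some and n is 0..9
          let n : Int := (PySem.Int.ofChars? [i]).getD 0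
          if numeros.contains n then
            -- conteo[int(i)] += 1 : n is 0..9, a non-negative in-range index
            conteo.set n.toNat (conteo.getD n.toNat 0 + 1)
          else conteo)
        conteo
    conteo.foldl (fun v i => if i > 1 then false else v) true

-- ===== PORT B =====
-- B's loop: one pass over clave; 'seen' holds the distinct digits met so far; early return False
-- on a repeated digit or a fifth digit (Lean: early return = stop recursing with false).
def pvBLoop : List Char → List Char → Bool
  | [], seen => seen.length == 4
  | c :: rest, seen =>
    if "0123456789".toList.contains c then
      if seen.contains c || seen.length == 4 then false
      else pvBLoop rest (seen ++ [c])
    else pvBLoop rest seen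

def verificar_numeros_alt (clave : String) : Bool :=
  pvBLoop clave.toList []

-- ===== PRECONDITION & SPEC =====
def Spec_verificar_numeros (clave : String) (out : Bool) : Prop := out = verificar_numeros_alt clave
instance (clave : String) (out : Bool) : Decidable (Spec_verificar_numeros clave out) := by unfold Spec_verificar_numeros; infer_instance

-- ===== CLAIM (what is proved, stated in full; the proofs are below) =====
def Claim_equal_verificar_numeros : Prop := ∀ (clave : String), Dom_verificar_numeros clave → Spec_verificar_numeros clave (verificar_numeros clave)

-- ===== LEMMAS AND PROOFS =====

-- the digit characters
def pvD : List Char := "0123456789".toList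

def pvDigitChar (j : Nat) : Char := pvD.getD j ' '

lemma pvD_eq : pvD = ['0','1','2','3','4','5','6','7','8','9'] := by decide

-- A's loop body (definitionally the step function of port A's counting loop)
def pvStep (conteo : List Int) (i : Char) : List Int :=
  let n : Int := (PySem.Int.ofChars? [i]).getD 0
  if (([0,1,2,3,4,5,6,7,8,9] : List Int)).contains n then
    conteo.set n.toNat (conteo.getD n.toNat 0 + 1)
  else conteo

-- the final A loop is an 'all ≤ 1' check
lemma pv_final_loop (l : List Int) (b : Bool) :
    l.foldl (fun v i => if i > 1 then false else v) b = (b && l.all (fun i => decide (i ≤ 1))) := by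
  induction l generalizing b with
  | nil => simp
  | cons x t ih =>
    simp only [List.foldl_cons, List.all_cons, ih]
    by_cases h : x > 1
    · simp [h, show ¬ (x ≤ 1) by omega]
    · simp [h, show x ≤ 1 by omega]

-- each digit char has a value k < 10, and pvDigitChar is its inverse
lemma pv_char_val (ch : Char) (h : ch ∈ pvD) :
    ∃ k : Nat, k < 10 ∧ (PySem.Int.ofChars? [ch]).getD 0 = (k : Int) ∧
      ∀ j : Nat, j < 10 → (pvDigitChar j = ch ↔ j = k) := by
  rw [pvD_eq] at h
  fin_cases h
  · exact ⟨0, by decide, by decide, by decide⟩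
  · exact ⟨1, by decide, by decide, by decide⟩
  · exact ⟨2, by decide, by decide, by decide⟩
  · exact ⟨3, by decide, by decide, by decide⟩
  · exact ⟨4, by decide, by decide, by decide⟩
  · exact ⟨5, by decide, by decide, by decide⟩
  · exact ⟨6, by decide, by decide, by decide⟩
  · exact ⟨7, by decide, by decide, by decide⟩
  · exact ⟨8, by decide, by decide, by decide⟩
  · exact ⟨9, by decide, by decide, by decide⟩

-- the counting loop: entry j of the result counts occurrences of digitChar j
lemma pv_count_loop (l : List Char) (hl : ∀ c ∈ l, c ∈ pvD) (c : List Int) (hc : c.length = 10) :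
    (l.foldl pvStep c).length = 10 ∧
    ∀ j : Nat, j < 10 →
      (l.foldl pvStep c).getD j 0 = c.getD j 0 + (l.count (pvDigitChar j) : Int) := by
  induction l generalizing c with
  | nil => exact ⟨hc, fun j _ => by simp⟩
  | cons ch t ih =>
    obtain ⟨k, hk, hval, hiff⟩ := pv_char_val ch (hl ch (by simp))
    have hcontains : (([0,1,2,3,4,5,6,7,8,9] : List Int)).contains ((k : Nat) : Int) = true := by
      interval_cases k <;> decide
    have hstep : pvStep c ch = c.set k (c.getD k 0 + 1) := by
      simp only [pvStep, hval, hcontains, if_true, Int.toNat_natCast]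
    have hc' : (c.set k (c.getD k 0 + 1)).length = 10 := by simp [hc]
    obtain ⟨ih1, ih2⟩ := ih (fun x hx => hl x (List.mem_cons_of_mem _ hx)) _ hc'
    rw [List.foldl_cons, hstep]
    refine ⟨ih1, ?_⟩
    intro j hj
    rw [ih2 j hj]
    by_cases hjk : j = k
    · subst hjk
      have hch : pvDigitChar j = ch := (hiff j hj).2 rfl
      have hcd : (ch :: t).count (pvDigitChar j) = t.count (pvDigitChar j) + 1 := by
        simp [hch]
      rw [hcd]
      have hg : (c.set j (c.getD j 0 + 1)).getD j 0 = c.getD j 0 + 1 := by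
        simp [List.getD, hc, hj]
      rw [hg]
      push_cast
      ring
    · have hch : pvDigitChar j ≠ ch := fun h => hjk ((hiff j hj).1 h)
      have hcd : (ch :: t).count (pvDigitChar j) = t.count (pvDigitChar j) := by
        simp [Ne.symm hch]
      rw [hcd]
      have hg : (c.set k (c.getD k 0 + 1)).getD j 0 = c.getD j 0 := by
        simp [List.getD, Ne.symm hjk]
      rw [hg]

-- A's value is 'the filtered digits number 4 and are pairwise distinct'
lemma pv_A_char (clave : String) :
    verificar_numeros clave =
      decide ((clave.toList.filter (fun c => "0123456789".toList.contains c)).length = 4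
        ∧ (clave.toList.filter (fun c => "0123456789".toList.contains c)).Nodup) := by
  unfold verificar_numeros
  simp only [PySem.List.foldl_append_if_eq_filter, List.nil_append]
  set ds : List Char := clave.toList.filter (fun c => "0123456789".toList.contains c) with hds
  have hmem : ∀ c ∈ ds, c ∈ pvD := by
    intro c hc
    rw [hds, List.mem_filter] at hc
    simpa [pvD] using hc.2
  by_cases hlen : ds.length = 4
  · rw [if_neg (by simp [hlen])]
    show (List.foldl pvStep ([0,0,0,0,0,0,0,0,0,0] : List Int) ds).foldl
        (fun v i => if i > 1 then false else v) true = _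
    obtain ⟨h10, hcnt⟩ := pv_count_loop ds hmem ([0,0,0,0,0,0,0,0,0,0] : List Int) (by decide)
    rw [pv_final_loop, Bool.true_and]
    have hzero : ∀ j : Nat, j < 10 → (([0,0,0,0,0,0,0,0,0,0] : List Int)).getD j 0 = 0 := by
      intro j hj; interval_cases j <;> rfl
    have hA : ((List.foldl pvStep ([0,0,0,0,0,0,0,0,0,0] : List Int) ds).all
        (fun i => decide (i ≤ 1)) = true) ↔ ds.Nodup := by
      rw [List.all_eq_true]
      constructor
      · intro h
        rw [List.nodup_iff_count_le_one]
        intro a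
        by_cases ha : a ∈ ds
        · obtain ⟨k, hk, _, hiff⟩ := pv_char_val a (hmem a ha)
          have hak : pvDigitChar k = a := (hiff k hk).2 rfl
          have hk' : k < (List.foldl pvStep ([0,0,0,0,0,0,0,0,0,0] : List Int) ds).length := by
            rw [h10]; exact hk
          have hmemc := h _ ((List.foldl pvStep ([0,0,0,0,0,0,0,0,0,0] : List Int) ds).getElem_mem hk')
          rw [← List.getD_eq_getElem _ 0 hk', hcnt k hk, hzero k hk, hak] at hmemc
          simp only [decide_eq_true_eq] at hmemc
          omega
        · rw [List.count_eq_zero.2 ha]; omega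
      · intro h x hx
        rw [List.nodup_iff_count_le_one] at h
        obtain ⟨k, hk', hxk⟩ := List.getElem_of_mem hx
        have hk : k < 10 := by rw [h10] at hk'; exact hk'
        have hx' : x = (List.foldl pvStep ([0,0,0,0,0,0,0,0,0,0] : List Int) ds).getD k 0 := by
          rw [List.getD_eq_getElem _ 0 hk', hxk]
        rw [hx', hcnt k hk, hzero k hk]
        have := h (pvDigitChar k)
        simp only [decide_eq_true_eq]
        omega
    rw [Bool.eq_iff_iff, hA]
    simp [hlen]
  · simp [hlen]

-- B's loop characterised: with a duplicate-free 'seen' of length ≤ 4, the loop decides whether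
-- seen plus the remaining digits make exactly 4 pairwise-distinct digits
lemma pv_B_char (l : List Char) (seen : List Char) (hnd : seen.Nodup) (hle : seen.length ≤ 4) :
    pvBLoop l seen =
      decide ((seen ++ l.filter (fun c => "0123456789".toList.contains c)).length = 4
        ∧ (seen ++ l.filter (fun c => "0123456789".toList.contains c)).Nodup) := by
  induction l generalizing seen with
  | nil =>
    by_cases h : seen.length = 4 <;> simp [pvBLoop, hnd, h]
  | cons c t ih =>
    have hstep : pvBLoop (c :: t) seen =
        if "0123456789".toList.contains c then
          if seen.contains c || seen.length == 4 then false
          else pvBLoop t (seen ++ [c])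
        else pvBLoop t seen := rfl
    by_cases hd : ("0123456789".toList.contains c) = true
    · rw [hstep, if_pos hd, List.filter_cons_of_pos hd]
      by_cases hin : seen.contains c = true
      · have hmemc : c ∈ seen := by simpa using hin
        rw [if_pos (by rw [hin, Bool.true_or])]
        have hnot : ¬ (seen ++ c :: t.filter (fun c => "0123456789".toList.contains c)).Nodup := by
          intro hnodup
          exact (List.disjoint_of_nodup_append hnodup) hmemc (List.mem_cons_self)
        rw [decide_eq_false (fun h => hnot h.2)]
      · have hcnot : c ∉ seen := fun h => hin (by simpa using h)
        by_cases h4 : seen.length = 4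
        · rw [if_pos (by simp [h4])]
          have hlen : (seen ++ c :: t.filter (fun c => "0123456789".toList.contains c)).length ≠ 4 := by
            simp only [List.length_append, List.length_cons, h4]; omega
          rw [decide_eq_false (fun h => hlen h.1)]
        · rw [if_neg (by simp [h4]; exact hcnot)]
          have hnd' : (seen ++ [c]).Nodup := by
            rw [List.nodup_append]
            refine ⟨hnd, List.nodup_singleton c, ?_⟩
            intro a ha b hb hab
            have hbc : b = c := by simpa using hb
            exact hcnot (hbc ▸ hab ▸ ha)
          have hle' : (seen ++ [c]).length ≤ 4 := by
            simp only [List.length_append, List.length_singleton]; omega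
          rw [ih (seen ++ [c]) hnd' hle']
          simp only [List.append_assoc, List.singleton_append]
    · rw [hstep, if_neg hd, List.filter_cons_of_neg hd]
      exact ih seen hnd hle

-- ===== VERDICT (by name: the statement is the Claim_ definition above) =====
theorem verificar_numeros_spec : Claim_equal_verificar_numeros := by
  intro clave _
  unfold Spec_verificar_numeros verificar_numeros_alt
  rw [pv_A_char, pv_B_char clave.toList [] (List.nodup_nil) (by simp)]
  simp
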